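-- pv_equiv track=rewrite | github.com/hongsy0113/algorithm-study | baekjoon/dp/1309/zoo.py | solve
-- ===== SOURCE A (Python) =====
-- def solve(n):
--     if n==1: return 3
--     dp= [[0]*3 for _ in range(n)]
--     dp[0] = [1, 1, 1]
--
--     for i in range(1, n):
--         # i번째 줄에서 사자를 안 넣을 경우
--         dp[i][0] = sum(dp[i-1]) % 9901
--         # i번째 줄에서 사자를 왼쪽 칸에 넣는 경우
--         dp[i][1] = (dp[i-1][2] + dp[i-1][0]) % 9901
--         # i번째 줄에서 사자를 오른쪽 칸에 넣는 경우
--         dp[i][2] = (dp[i-1][1] + dp[i-1][0]) % 9901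
--     return sum(dp[n-1]) % 9901
-- ===== SOURCE B (Python) =====
-- MOD = 9901
-- _BASE = ((1, 1, 1), (1, 0, 1), (1, 1, 0))
-- _ID = ((1, 0, 0), (0, 1, 0), (0, 0, 1))
--
-- def _mul(A, B):
--     return tuple(tuple((A[i][0] * B[0][j] + A[i][1] * B[1][j] + A[i][2] * B[2][j]) % MOD
--                        for j in range(3)) for i in range(3))
--
-- def _pow(M, k):
--     if k == 0:
--         return _ID
--     H = _pow(M, k // 2)
--     H2 = _mul(H, H)
--     return _mul(H2, M) if k % 2 == 1 else H2
--
-- def solve(n):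
--     P = _pow(_BASE, n - 1)
--     return sum(x for row in P for x in row) % MOD
-- ===== Notes on version B (the rewrite author's own statement) =====
-- stated objective: faster
-- what changed: Replaces the O(n) row-by-row DP table with exponentiation-by-squaring of the 3x3 transfer matrix mod 9901, so the answer is the sum of the entries of M^(n-1) computed in O(log n) multiplications.
import Mathlib
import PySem

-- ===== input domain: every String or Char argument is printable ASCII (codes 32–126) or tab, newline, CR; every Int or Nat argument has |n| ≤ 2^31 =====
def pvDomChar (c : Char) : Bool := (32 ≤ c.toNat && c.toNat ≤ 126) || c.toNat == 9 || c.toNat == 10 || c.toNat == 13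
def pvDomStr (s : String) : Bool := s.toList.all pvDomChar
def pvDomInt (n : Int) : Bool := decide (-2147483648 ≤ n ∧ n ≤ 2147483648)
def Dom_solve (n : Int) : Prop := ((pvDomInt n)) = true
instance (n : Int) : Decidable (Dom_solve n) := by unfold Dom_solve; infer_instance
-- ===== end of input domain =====

-- B replaces A's O(n) DP loop by O(log n) binary exponentiation of the 3x3 transfer matrix mod 9901.

-- ===== PORT A =====
-- Python's three assignments dp[i][0..2]=… read only dp[i-1], so they are ported as
-- writing the freshly built length-3 row at index i (dp[i] starts as [0,0,0], all in range).
def solve (n : Int) : Int :=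
  if n == 1 then 3
  else
    let dp0 : List (List Int) := (List.replicate n.toNat ([0, 0, 0] : List Int)).set 0 [1, 1, 1]
    let dp := (PySem.List.pyRange 1 n 1).foldl
      (fun dp i =>
        let prev := (PySem.List.pyGet? dp (i - 1)).getD []
        let r0 := PySem.Int.mod prev.sum 9901
        let r1 := PySem.Int.mod ((PySem.List.pyGet? prev 2).getD 0 + (PySem.List.pyGet? prev 0).getD 0) 9901
        let r2 := PySem.Int.mod ((PySem.List.pyGet? prev 1).getD 0 + (PySem.List.pyGet? prev 0).getD 0) 9901
        dp.set i.toNat [r0, r1, r2]) dp0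
    PySem.Int.mod ((PySem.List.pyGet? dp (n - 1)).getD []).sum 9901

-- ===== PORT B =====
def PvMat : Type := (Int × Int × Int) × (Int × Int × Int) × (Int × Int × Int)

def pvBase : PvMat := ((1, 1, 1), (1, 0, 1), (1, 1, 0))

def pvId : PvMat := ((1, 0, 0), (0, 1, 0), (0, 0, 1))

def pvMul (A B : PvMat) : PvMat :=
  ((PySem.Int.mod (A.1.1 * B.1.1 + A.1.2.1 * B.2.1.1 + A.1.2.2 * B.2.2.1) 9901,
    PySem.Int.mod (A.1.1 * B.1.2.1 + A.1.2.1 * B.2.1.2.1 + A.1.2.2 * B.2.2.2.1) 9901,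
    PySem.Int.mod (A.1.1 * B.1.2.2 + A.1.2.1 * B.2.1.2.2 + A.1.2.2 * B.2.2.2.2) 9901),
   (PySem.Int.mod (A.2.1.1 * B.1.1 + A.2.1.2.1 * B.2.1.1 + A.2.1.2.2 * B.2.2.1) 9901,
    PySem.Int.mod (A.2.1.1 * B.1.2.1 + A.2.1.2.1 * B.2.1.2.1 + A.2.1.2.2 * B.2.2.2.1) 9901,
    PySem.Int.mod (A.2.1.1 * B.1.2.2 + A.2.1.2.1 * B.2.1.2.2 + A.2.1.2.2 * B.2.2.2.2) 9901),
   (PySem.Int.mod (A.2.2.1 * B.1.1 + A.2.2.2.1 * B.2.1.1 + A.2.2.2.2 * B.2.2.1) 9901,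
    PySem.Int.mod (A.2.2.1 * B.1.2.1 + A.2.2.2.1 * B.2.1.2.1 + A.2.2.2.2 * B.2.2.2.1) 9901,
    PySem.Int.mod (A.2.2.1 * B.1.2.2 + A.2.2.2.1 * B.2.1.2.2 + A.2.2.2.2 * B.2.2.2.2) 9901))

def pvPow (M : PvMat) (k : Nat) : PvMat :=
  if h : k = 0 then pvId
  else
    let H := pvPow M (k / 2)
    let H2 := pvMul H H
    if k % 2 == 1 then pvMul H2 M else H2
termination_by k
decreasing_by exact Nat.div_lt_self (Nat.pos_of_ne_zero h) one_lt_two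

def solve_alt (n : Int) : Int :=
  let P := pvPow pvBase (n - 1).toNat
  PySem.Int.mod
    (P.1.1 + P.1.2.1 + P.1.2.2 + P.2.1.1 + P.2.1.2.1 + P.2.1.2.2 +
      P.2.2.1 + P.2.2.2.1 + P.2.2.2.2) 9901

-- ===== PRECONDITION & SPEC =====
-- Pre_ excludes n ≤ 0, where A raises IndexError (dp[0] = … on an empty table).
def Pre_solve (n : Int) : Prop := 1 ≤ n
instance (n : Int) : Decidable (Pre_solve n) := by unfold Pre_solve; infer_instance

def pvWitness_solve : Int := 4

def Spec_solve (n : Int) (out : Int) : Prop := out = solve_alt n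
instance (n : Int) (out : Int) : Decidable (Spec_solve n out) := by unfold Spec_solve; infer_instance

-- ===== CLAIM (what is proved, stated in full; the proofs are below) =====
def Claim_equal_solve : Prop := ∀ (n : Int), Dom_solve n → Pre_solve n → Spec_solve n (solve n)

-- ===== LEMMAS AND PROOFS =====

-- A's per-row update as a function on the triple (dp[i][0], dp[i][1], dp[i][2]).
def pvStep (v : Int × Int × Int) : Int × Int × Int :=
  (PySem.Int.mod (v.1 + v.2.1 + v.2.2) 9901,
   PySem.Int.mod (v.2.2 + v.1) 9901,
   PySem.Int.mod (v.2.1 + v.1) 9901)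

def pvIter (k : Nat) : Int × Int × Int := pvStep^[k] (1, 1, 1)

def pvRow (v : Int × Int × Int) : List Int := [v.1, v.2.1, v.2.2]

noncomputable def pvCastM (M : PvMat) : Matrix (Fin 3) (Fin 3) (ZMod 9901) :=
  !![(M.1.1 : ZMod 9901), M.1.2.1, M.1.2.2; M.2.1.1, M.2.1.2.1, M.2.1.2.2; M.2.2.1, M.2.2.2.1, M.2.2.2.2]

noncomputable def pvCastV (v : Int × Int × Int) : Fin 3 → (ZMod 9901) := ![(v.1 : ZMod 9901), v.2.1, v.2.2]

theorem pvCast_mod (a : Int) : ((PySem.Int.mod a 9901 : Int) : ZMod 9901) = (a : ZMod 9901) := by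
  rw [PySem.Int.mod_eq_emod_of_pos (a := a) (by norm_num)]
  exact_mod_cast ZMod.intCast_mod a 9901

theorem pvCast_emod (a : Int) : ((a % 9901 : Int) : ZMod 9901) = (a : ZMod 9901) := by
  exact_mod_cast ZMod.intCast_mod a 9901

set_option maxHeartbeats 1000000 in
theorem pvCastM_mul (A B : PvMat) : pvCastM (pvMul A B) = pvCastM A * pvCastM B := by
  ext i j
  fin_cases i <;> fin_cases j <;>
    simp [pvCastM, pvMul, Matrix.mul_apply, Fin.sum_univ_three, pvCast_mod, pvCast_emod] <;> push_cast <;> ring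

theorem pvCastM_id : pvCastM pvId = 1 := by
  ext i j
  fin_cases i <;> fin_cases j <;> simp [pvCastM, pvId, Matrix.one_apply]

theorem pvCastM_pow (M : PvMat) (k : Nat) : pvCastM (pvPow M k) = pvCastM M ^ k := by
  induction k using Nat.strong_induction_on with
  | _ k ih =>
    rw [pvPow]
    by_cases h : k = 0
    · simp [h, pvCastM_id]
    · rw [dif_neg h]
      have ihh := ih (k / 2) (Nat.div_lt_self (Nat.pos_of_ne_zero h) one_lt_two)
      by_cases hp : k % 2 = 1
      · simp only [hp, beq_self_eq_true, if_true, pvCastM_mul, ihh]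
        rw [← pow_add, ← pow_succ]
        congr 1
        omega
      · have hp0 : k % 2 = 0 := by omega
        simp only [hp0, show ((0 : Nat) == 1) = false from rfl, Bool.false_eq_true, if_false]
        rw [pvCastM_mul, ihh, ← pow_add]
        congr 1
        omega

theorem pvCastV_step (v : Int × Int × Int) :
    pvCastV (pvStep v) = (pvCastM pvBase).mulVec (pvCastV v) := by
  funext i
  fin_cases i <;>
    simp [pvCastV, pvStep, pvCastM, pvBase, Matrix.mulVec, dotProduct, Fin.sum_univ_three,
      pvCast_mod, pvCast_emod] <;> push_cast <;> ring

theorem pvCastV_iter (k : Nat) :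
    pvCastV (pvIter k) = (pvCastM pvBase ^ k).mulVec (pvCastV (1, 1, 1)) := by
  induction k with
  | zero => simp [pvIter]
  | succ k ih =>
    rw [pvIter, Function.iterate_succ_apply', ← pvIter, pvCastV_step, ih,
      Matrix.mulVec_mulVec, ← pow_succ']

-- the fold invariant: after processing range(1, 1+t) the table holds rows pvIter 0 .. pvIter t
theorem pvFold_inv (N t : Nat) (hN : 1 ≤ N) (ht : t ≤ N - 1) :
    (PySem.List.pyRange 1 (1 + (t : Int)) 1).foldl
      (fun dp i =>
        let prev := (PySem.List.pyGet? dp (i - 1)).getD []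
        let r0 := PySem.Int.mod prev.sum 9901
        let r1 := PySem.Int.mod ((PySem.List.pyGet? prev 2).getD 0 + (PySem.List.pyGet? prev 0).getD 0) 9901
        let r2 := PySem.Int.mod ((PySem.List.pyGet? prev 1).getD 0 + (PySem.List.pyGet? prev 0).getD 0) 9901
        dp.set i.toNat [r0, r1, r2])
      ((List.replicate N ([0, 0, 0] : List Int)).set 0 [1, 1, 1]) =
    (List.range N).map (fun j => if j ≤ t then pvRow (pvIter j) else [0, 0, 0]) := by
  induction t with
  | zero =>
    rw [show (1 + (0 : Nat) : Int) = 1 by norm_num, PySem.List.pyRange_one_eq_nil le_rfl]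
    simp only [List.foldl_nil]
    apply List.ext_getElem
    · simp
    · intro j h1 h2
      simp only [List.getElem_set, List.getElem_replicate, List.getElem_map, List.getElem_range]
      split_ifs with hj1 hj2
      · subst hj1; simp [pvRow, pvIter]
      · omega
      · omega
      · rfl
  | succ t ih =>
    have ht' : t ≤ N - 1 := by omega
    have htN : t < N := by omega
    have h1t : (1 : Int) ≤ 1 + (t : Int) := by omega
    rw [show (1 + ((t + 1 : Nat)) : Int) = (1 + (t : Int)) + 1 by push_cast; ring,
      PySem.List.pyRange_one_succ_right h1t, List.foldl_append, ih ht', List.foldl_cons,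
      List.foldl_nil]
    simp only
    rw [show (1 + (t : Int)) - 1 = ((t : Nat) : Int) by push_cast; ring]
    rw [PySem.List.pyGet?_natCast]
    simp only [List.getElem?_map, List.getElem?_range htN, Option.map_some, Option.getD_some,
      le_refl, if_true]
    rw [show ((1 + (t : Int)).toNat) = t + 1 by omega]
    have hrow : [PySem.Int.mod (pvRow (pvIter t)).sum 9901,
        PySem.Int.mod ((PySem.List.pyGet? (pvRow (pvIter t)) 2).getD 0 +
          (PySem.List.pyGet? (pvRow (pvIter t)) 0).getD 0) 9901,
        PySem.Int.mod ((PySem.List.pyGet? (pvRow (pvIter t)) 1).getD 0 +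
          (PySem.List.pyGet? (pvRow (pvIter t)) 0).getD 0) 9901]
        = pvRow (pvIter (t + 1)) := by
      have hit : pvIter (t + 1) = pvStep (pvIter t) := by
        rw [pvIter, pvIter, Function.iterate_succ_apply']
      rw [hit]
      simp [pvRow, pvStep, PySem.List.pyGet?, PySem.List.pyIdx?]
      congr 1
      ring
    rw [hrow]
    apply List.ext_getElem
    · simp
    · intro j hj1 hj2
      simp only [List.getElem_set, List.getElem_map, List.getElem_range]
      split_ifs with h1 h2 <;> first | rfl | omega | (subst h1; rfl) | simp_all

theorem pv_mod_eq_of_cast (a b : Int) (h : (a : ZMod 9901) = b) :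
    PySem.Int.mod a 9901 = PySem.Int.mod b 9901 := by
  rw [PySem.Int.mod_eq_emod_of_pos (a := a) (by norm_num),
    PySem.Int.mod_eq_emod_of_pos (a := b) (by norm_num)]
  have := (ZMod.intCast_eq_intCast_iff a b 9901).1 h
  exact_mod_cast this

-- ===== VERDICT (by name: the statement is the Claim_ definition above) =====
theorem solve_spec : Claim_equal_solve := by
  intro n _ hpre
  unfold Pre_solve at hpre
  unfold Spec_solve
  by_cases hn1 : n = 1
  · subst hn1
    rw [solve]
    norm_num
    rw [solve_alt]
    simp only [show ((1 : Int) - 1).toNat = 0 from rfl]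
    rw [pvPow]
    norm_num [pvId]
  · have hbeq : (n == 1) = false := by simp [hn1]
    rw [solve, hbeq]
    simp only [Bool.false_eq_true, if_false]
    rw [solve_alt]
    set N := n.toNat with hNdef
    have hN : 1 ≤ N := by omega
    have hn : n = 1 + ((N - 1 : Nat) : Int) := by omega
    rw [hn, pvFold_inv N (N - 1) hN le_rfl]
    rw [show (1 + ((N - 1 : Nat) : Int)) - 1 = ((N - 1 : Nat) : Int) by push_cast; ring]
    rw [PySem.List.pyGet?_natCast]
    have hlt : N - 1 < N := by omega
    simp only [List.getElem?_map, List.getElem?_range hlt, Option.map_some, Option.getD_some,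
      le_refl, if_true]
    rw [show (((N - 1 : Nat) : Int)).toNat = N - 1 by omega]
    apply pv_mod_eq_of_cast
    have hcv := pvCastV_iter (N - 1)
    rw [← pvCastM_pow] at hcv
    have h0 := congrFun hcv 0
    have h1 := congrFun hcv 1
    have h2 := congrFun hcv 2
    simp [pvCastV, pvCastM, Matrix.mulVec, dotProduct, Fin.sum_univ_three,
      Matrix.vecHead, Matrix.vecTail] at h0 h1 h2
    simp only [pvRow, List.sum_cons, List.sum_nil]
    push_cast
    linear_combination h0 + h1 + h2
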